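-- pv_equiv track=rewrite | github.com/PrithviBhatB/Extended-hypothesis-testing-during-the-estimation-of-mixed-Logit-models- | HP_tuning/Case_8/Swissmetro_Final_SOOF_10.11.2021_8.py | prespec_features
-- ===== SOURCE A (Python) =====
-- asvarnames = ['TIME', 'COST', 'HEADWAY', 'TIME_L1',
--             'TIME_L2', 'COST_L1', 'COST_L2', 'HEADWAY_L1', 'HEADWAY_L2'] # alternative-specific variables in varnames
--
-- isvarnames = ['GA','SEATS', 'AGE', 'LUGGAGE', 'INCOME', 'MALE', 'WHO','FIRST'] # individual-specific variables in varnames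
--
-- def prespec_features(ind_psasvar,ind_psisvar,ind_pspecdist,ind_psbcvar,ind_pscorvar):
--     """
--     Generates lists of features that are predetermined by the modeller for the model development
--     Inputs:
--     (1) ind_psasvar - indicator list for prespecified asvars
--     (2) ind_psisvar - indicator list for prespecified isvars
--     (3) ind_pspecdist - indicator list for vars with prespecified coefficient distribution
--     (4) ind_psbcvar - indicator list for vars with prespecified transformation
--     (5) ind_pscorvar - indicator list for vars with prespecified correlation
--     """
--     #prespecified alternative-specific variables
--     ps_asvar_pos = [i for i, x in enumerate(ind_psasvar) if x == 1]
--     ps_asvars = [var for var in asvarnames if asvarnames.index(var) in ps_asvar_pos]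
--
--     #prespecified individual-specific variables
--     ps_isvar_pos = [i for i, x in enumerate(ind_psisvar) if x == 1]
--     ps_isvars = [var for var in isvarnames if isvarnames.index(var) in ps_isvar_pos]
--
--     ##prespecified coeff distributions for variables
--     ps_rvar_ind = dict(zip(asvarnames,ind_pspecdist))
--     ps_rvars = {k:v for k,v in ps_rvar_ind.items() if v != "any"}
--
--     #prespecified non-linear transformed variables
--     ps_bcvar_pos = [i for i, x in enumerate(ind_psbcvar) if x == 1]
--     ps_bcvars = [var for var in asvarnames if asvarnames.index(var) in ps_bcvar_pos]
--
--     #prespecified correlated variables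
--     ps_corvar_pos = [i for i, x in enumerate(ind_pscorvar) if x == 1]
--     ps_corvars = [var for var in asvarnames if asvarnames.index(var) in ps_corvar_pos]
--
--     return(ps_asvars,ps_isvars,ps_rvars,ps_bcvars,ps_corvars)
-- ===== SOURCE B (Python) =====
-- asvarnames = ['TIME', 'COST', 'HEADWAY', 'TIME_L1',
--             'TIME_L2', 'COST_L1', 'COST_L2', 'HEADWAY_L1', 'HEADWAY_L2']
--
-- isvarnames = ['GA', 'SEATS', 'AGE', 'LUGGAGE', 'INCOME', 'MALE', 'WHO', 'FIRST']
--
-- def prespec_features(ind_psasvar, ind_psisvar, ind_pspecdist, ind_psbcvar, ind_pscorvar):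
--     """Single parallel pass per selection: zip names with indicators, keep names flagged 1;
--     no intermediate position lists, no .index() membership tests."""
--     ps_asvars = [var for var, x in zip(asvarnames, ind_psasvar) if x == 1]
--     ps_isvars = [var for var, x in zip(isvarnames, ind_psisvar) if x == 1]
--     ps_rvars = {k: v for k, v in zip(asvarnames, ind_pspecdist) if v != "any"}
--     ps_bcvars = [var for var, x in zip(asvarnames, ind_psbcvar) if x == 1]
--     ps_corvars = [var for var, x in zip(asvarnames, ind_pscorvar) if x == 1]
--     return (ps_asvars, ps_isvars, ps_rvars, ps_bcvars, ps_corvars)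
-- ===== Notes on version B (the rewrite author's own statement) =====
-- stated objective: simpler
-- what changed: Each selection becomes one parallel zip pass over (name, indicator) pairs, dropping the intermediate position lists and the per-name .index()-in-positions membership scans; the prespecified-distribution dict is built directly as a filtered zip comprehension instead of dict(zip(...)) followed by a second dict comprehension.
import Mathlib
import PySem

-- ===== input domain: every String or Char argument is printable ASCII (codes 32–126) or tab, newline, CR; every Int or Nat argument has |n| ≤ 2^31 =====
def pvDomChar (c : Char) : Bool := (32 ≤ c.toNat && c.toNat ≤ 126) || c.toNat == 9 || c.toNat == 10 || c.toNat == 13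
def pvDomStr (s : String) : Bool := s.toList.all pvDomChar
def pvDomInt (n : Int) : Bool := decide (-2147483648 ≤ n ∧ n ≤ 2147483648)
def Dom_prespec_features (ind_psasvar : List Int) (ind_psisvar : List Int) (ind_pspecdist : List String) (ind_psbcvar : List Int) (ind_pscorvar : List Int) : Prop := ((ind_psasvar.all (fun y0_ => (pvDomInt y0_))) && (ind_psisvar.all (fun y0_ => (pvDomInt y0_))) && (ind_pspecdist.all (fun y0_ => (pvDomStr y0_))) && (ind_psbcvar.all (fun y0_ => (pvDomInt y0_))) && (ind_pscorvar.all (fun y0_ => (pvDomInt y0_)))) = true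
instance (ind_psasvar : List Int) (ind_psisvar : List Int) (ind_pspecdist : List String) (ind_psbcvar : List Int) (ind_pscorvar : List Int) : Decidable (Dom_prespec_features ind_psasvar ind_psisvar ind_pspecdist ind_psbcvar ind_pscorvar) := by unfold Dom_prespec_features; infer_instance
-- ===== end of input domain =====

-- ===== PORT A =====
-- B replaces A's position-lists + .index membership tests by single zip passes (simpler decomposition, same results).
def pvAsvarnames : List String :=
  ["TIME", "COST", "HEADWAY", "TIME_L1", "TIME_L2", "COST_L1", "COST_L2", "HEADWAY_L1", "HEADWAY_L2"]

def pvIsvarnames : List String :=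
  ["GA", "SEATS", "AGE", "LUGGAGE", "INCOME", "MALE", "WHO", "FIRST"]

-- A's `[i for i, x in enumerate(ind) if x == 1]`
def pvPos (ind : List Int) : List Int :=
  (PySem.List.enumerate ind 0).filterMap (fun p => if p.2 = 1 then some p.1 else none)

-- A's `[var for var in names if names.index(var) in pos]` (`.index` cannot raise: var ∈ names)
def pvIdxSel (names : List String) (pos : List Int) : List String :=
  names.filter (fun var =>
    match PySem.List.index? names var with
    | some i => decide ((i : Int) ∈ pos)
    | none => false)

def prespec_features (ind_psasvar : List Int) (ind_psisvar : List Int) (ind_pspecdist : List String) (ind_psbcvar : List Int) (ind_pscorvar : List Int) : List String × List String × (List (String × String)) × List String × List String :=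
  let ps_asvar_pos := pvPos ind_psasvar
  let ps_asvars := pvIdxSel pvAsvarnames ps_asvar_pos
  let ps_isvar_pos := pvPos ind_psisvar
  let ps_isvars := pvIdxSel pvIsvarnames ps_isvar_pos
  let ps_rvar_ind := PySem.Dict.ofList (pvAsvarnames.zip ind_pspecdist)
  let ps_rvars := (PySem.Dict.ofList (ps_rvar_ind.items.filter (fun kv => kv.2 != "any"))).items
  let ps_bcvar_pos := pvPos ind_psbcvar
  let ps_bcvars := pvIdxSel pvAsvarnames ps_bcvar_pos
  let ps_corvar_pos := pvPos ind_pscorvar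
  let ps_corvars := pvIdxSel pvAsvarnames ps_corvar_pos
  (ps_asvars, ps_isvars, ps_rvars, ps_bcvars, ps_corvars)

-- ===== PORT B =====
-- B's `[var for var, x in zip(names, ind) if x == 1]`
def pvZipSel (names : List String) (ind : List Int) : List String :=
  (names.zip ind).filterMap (fun p => if p.2 = 1 then some p.1 else none)

def prespec_features_alt (ind_psasvar : List Int) (ind_psisvar : List Int) (ind_pspecdist : List String) (ind_psbcvar : List Int) (ind_pscorvar : List Int) : List String × List String × (List (String × String)) × List String × List String :=
  (pvZipSel pvAsvarnames ind_psasvar,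
   pvZipSel pvIsvarnames ind_psisvar,
   (PySem.Dict.ofList ((pvAsvarnames.zip ind_pspecdist).filter (fun kv => kv.2 != "any"))).items,
   pvZipSel pvAsvarnames ind_psbcvar,
   pvZipSel pvAsvarnames ind_pscorvar)

-- ===== PRECONDITION & SPEC =====
def Spec_prespec_features (ind_psasvar : List Int) (ind_psisvar : List Int) (ind_pspecdist : List String) (ind_psbcvar : List Int) (ind_pscorvar : List Int) (out : List String × List String × (List (String × String)) × List String × List String) : Prop := out = prespec_features_alt ind_psasvar ind_psisvar ind_pspecdist ind_psbcvar ind_pscorvar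
instance (ind_psasvar : List Int) (ind_psisvar : List Int) (ind_pspecdist : List String) (ind_psbcvar : List Int) (ind_pscorvar : List Int) (out : List String × List String × (List (String × String)) × List String × List String) : Decidable (Spec_prespec_features ind_psasvar ind_psisvar ind_pspecdist ind_psbcvar ind_pscorvar out) := by unfold Spec_prespec_features; infer_instance

-- ===== CLAIM (what is proved, stated in full; the proofs are below) =====
def Claim_equal_prespec_features : Prop := ∀ (ind_psasvar : List Int) (ind_psisvar : List Int) (ind_pspecdist : List String) (ind_psbcvar : List Int) (ind_pscorvar : List Int), Dom_prespec_features ind_psasvar ind_psisvar ind_pspecdist ind_psbcvar ind_pscorvar → Spec_prespec_features ind_psasvar ind_psisvar ind_pspecdist ind_psbcvar ind_pscorvar (prespec_features ind_psasvar ind_psisvar ind_pspecdist ind_psbcvar ind_pscorvar)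

-- ===== LEMMAS AND PROOFS =====

-- membership in A's position list is exactly "that indicator entry is 1"
theorem pvMem_pos (ind : List Int) (k : Int) :
    k ∈ pvPos ind ↔ (0 ≤ k ∧ ind[k.toNat]? = some 1) := by
  simp [pvPos, List.mem_filterMap, PySem.List.mem_enumerate_iff]
  constructor
  · rintro ⟨a, ⟨hlt, he⟩, rfl⟩
    simp [List.getElem?_eq_getElem hlt, he]
  · rintro ⟨hk, h⟩
    have hlt : k.toNat < ind.length := by
      by_contra hc; simp [List.getElem?_eq_none (le_of_not_gt hc)] at h
    exact ⟨k.toNat, ⟨hlt, by simpa [List.getElem?_eq_getElem hlt] using h⟩, by omega⟩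

-- A's index-based selection over a suffix of a duplicate-free name list equals B's zip pass on the dropped indicators
theorem pvIdxSel_aux (ind : List Int) :
    ∀ (names pre : List String), (pre ++ names).Nodup →
      names.filter (fun var =>
        match PySem.List.index? (pre ++ names) var with
        | some i => decide ((i : Int) ∈ pvPos ind)
        | none => false)
      = pvZipSel names (ind.drop pre.length) := by
  intro names
  induction names with
  | nil => intro pre _; simp [pvZipSel]
  | cons n ns ih =>
    intro pre hnd
    have hn_pre : n ∉ pre := fun h => (List.disjoint_of_nodup_append hnd) h (by simp)
    have hidx : PySem.List.index? (pre ++ n :: ns) n = some pre.length :=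
      (PySem.List.index?_eq_some_iff _ _ _).mpr ⟨pre, ns, rfl, rfl, hn_pre⟩
    have hassoc : (pre ++ [n]) ++ ns = pre ++ n :: ns := by simp
    have ih' := ih (pre ++ [n]) (by rw [hassoc]; exact hnd)
    rw [hassoc] at ih'
    simp only [List.length_append, List.length_cons, List.length_nil] at ih'
    rw [List.filter_cons, hidx]
    rcases hdrop : ind.drop pre.length with _ | ⟨x, xs⟩
    · have hnone : ind[pre.length]? = none :=
        List.getElem?_eq_none (by simpa using List.drop_eq_nil_iff.mp hdrop)
      have hcond : ¬ ((pre.length : Int) ∈ pvPos ind) := by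
        rw [pvMem_pos]; simp [hnone]
      have hxs : ind.drop (pre.length + 1) = [] := by
        have : ind.drop (pre.length + 1) = (ind.drop pre.length).drop 1 := by
          rw [List.drop_drop]
        simp [this, hdrop]
      rw [ih', hxs]
      simp [pvZipSel, hcond]
    · have hget : ind[pre.length]? = some x := by
        have h0 : (ind.drop pre.length)[0]? = ind[pre.length + 0]? := List.getElem?_drop
        simpa [hdrop] using h0.symm
      have hxs : ind.drop (pre.length + 1) = xs := by
        have : ind.drop (pre.length + 1) = (ind.drop pre.length).drop 1 := by
          rw [List.drop_drop]
        simp [this, hdrop]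
      have hcond : ((pre.length : Int) ∈ pvPos ind) ↔ x = 1 := by
        rw [pvMem_pos]; simp [hget]
      rw [ih', hxs]
      by_cases hx : x = 1
      · simp [pvZipSel, hcond, hx]
      · simp [pvZipSel, hcond, hx]

theorem pvIdxSel_eq (names : List String) (hnd : names.Nodup) (ind : List Int) :
    pvIdxSel names (pvPos ind) = pvZipSel names ind := by
  have := pvIdxSel_aux ind names [] (by simpa using hnd)
  simpa [pvIdxSel] using this

theorem pvMapFst_zip_sublist {A B : Type} : ∀ (xs : List A) (ys : List B),
    ((xs.zip ys).map Prod.fst).Sublist xs := by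
  intro xs
  induction xs with
  | nil => intro ys; simp
  | cons x xs ih =>
    intro ys
    cases ys with
    | nil => simp
    | cons y ys => simpa using (ih ys).cons₂ x

theorem pvItems_ofList (pairs : List (String × String)) (h : (pairs.map Prod.fst).Nodup) :
    (PySem.Dict.ofList pairs).items = pairs := by
  have := PySem.Dict.items_foldl_insert_fresh pairs Prod.fst Prod.snd PySem.Dict.empty
    (by simp) h
  simpa [PySem.Dict.ofList, PySem.Dict.update] using this

theorem pvRvars_eq (dist : List String) :
    (PySem.Dict.ofList ((PySem.Dict.ofList (pvAsvarnames.zip dist)).items.filter (fun kv => kv.2 != "any"))).items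
    = (PySem.Dict.ofList ((pvAsvarnames.zip dist).filter (fun kv => kv.2 != "any"))).items := by
  have hnd : ((pvAsvarnames.zip dist).map Prod.fst).Nodup :=
    (pvMapFst_zip_sublist pvAsvarnames dist).nodup (by decide)
  rw [pvItems_ofList _ hnd]

-- ===== VERDICT (by name: the statement is the Claim_ definition above) =====
theorem prespec_features_spec : Claim_equal_prespec_features := by
  intro a b c d e _
  unfold Spec_prespec_features prespec_features prespec_features_alt
  refine Prod.ext ?_ (Prod.ext ?_ (Prod.ext ?_ (Prod.ext ?_ ?_))) <;> simp only
  · exact pvIdxSel_eq pvAsvarnames (by decide) a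
  · exact pvIdxSel_eq pvIsvarnames (by decide) b
  · exact pvRvars_eq c
  · exact pvIdxSel_eq pvAsvarnames (by decide) d
  · exact pvIdxSel_eq pvAsvarnames (by decide) e
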